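-- pv_equiv track=rewrite | github.com/kmsong12/arc374-plangeneration | llm_bridge.py | _coerce_enabled_roomtypes
-- ===== SOURCE A (Python) =====
-- from typing import Any, Dict, List, Literal, Optional, Tuple, Union
--
-- KNOWN_LIBRARY_ROOMTYPES = frozenset({"bedroom", "public room"})
--
-- def _coerce_enabled_roomtypes(raw: Any) -> Optional[List[str]]:
--     """
--     Normalize API ``enabled_roomtypes`` / ``roomtypes`` to library literals
--     (``bedroom``, ``public room``). Unknown strings are skipped.
--     """
--     if not isinstance(raw, list) or not raw:
--         return None
--     out: List[str] = []
--     for x in raw: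
--         s = str(x).strip().lower().replace("_", " ")
--         if s in ("public", "commons", "communal"):
--             s = "public room"
--         if s in KNOWN_LIBRARY_ROOMTYPES:
--             out.append(s)
--     seen: set = set()
--     deduped: List[str] = []
--     for x in out:
--         if x not in seen:
--             seen.add(x)
--             deduped.append(x)
--     return deduped or None
-- ===== SOURCE B (Python) =====
-- KNOWN_LIBRARY_ROOMTYPES = frozenset({"bedroom", "public room"})
--
--
-- def _coerce_enabled_roomtypes(raw):
--     """The target vocabulary has only two literals, so the result is fully
--     determined by the first occurrence of each: normalize once, find the two
--     first-occurrence indices, and order the (at most two) literals by them —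
--     no filter pass, no seen-set, no dedup loop."""
--     if not isinstance(raw, list) or not raw:
--         return None
--     normed = []
--     for x in raw:
--         s = str(x).strip().lower().replace("_", " ")
--         normed.append("public room" if s in ("public", "commons", "communal") else s)
--     try:
--         b = normed.index("bedroom")
--     except ValueError:
--         b = None
--     try:
--         p = normed.index("public room")
--     except ValueError:
--         p = None
--     if b is None:
--         return ["public room"] if p is not None else None
--     if p is None:
--         return ["bedroom"]
--     return ["bedroom", "public room"] if b < p else ["public room", "bedroom"]
-- ===== Notes on version B (the rewrite author's own statement) =====
-- stated objective: alternative
-- what changed: B exploits that the target vocabulary has exactly two literals: instead of A's filter pass plus seen-set dedup pass, it computes the first-occurrence index of 'bedroom' and of 'public room' in the normalized list and assembles the answer directly by comparing those two indices.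
import Mathlib
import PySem

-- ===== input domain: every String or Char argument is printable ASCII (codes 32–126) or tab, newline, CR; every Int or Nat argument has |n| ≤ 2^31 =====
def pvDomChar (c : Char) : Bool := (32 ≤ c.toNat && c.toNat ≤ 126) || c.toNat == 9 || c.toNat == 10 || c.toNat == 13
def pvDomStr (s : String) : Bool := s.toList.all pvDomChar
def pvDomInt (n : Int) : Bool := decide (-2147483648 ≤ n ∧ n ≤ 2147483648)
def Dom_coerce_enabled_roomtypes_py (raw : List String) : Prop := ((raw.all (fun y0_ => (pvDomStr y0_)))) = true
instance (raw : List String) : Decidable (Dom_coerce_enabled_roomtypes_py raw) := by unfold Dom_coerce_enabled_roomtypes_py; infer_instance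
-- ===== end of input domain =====

-- B replaces A's filter pass + seen-set dedup pass by computing the two first-occurrence
-- indices of the only two library literals and assembling the answer from them (objective: alternative).

-- ===== PORT A =====
-- shared transliteration of the normalization lines both Pythons contain:
-- s = str(x).strip().lower().replace("_", " "); if s in ("public","commons","communal"): s = "public room"
def pvNorm (x : String) : String :=
  let s := PySem.Str.replace (PySem.Str.lower (PySem.Str.strip x)) "_" " "
  if s == "public" || s == "commons" || s == "communal" then "public room" else s

def coerce_enabled_roomtypes_py (raw : List String) : Option (List String) :=
  if raw.isEmpty then none else
  let out : List String := raw.foldl (fun out x =>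
    let s := pvNorm x
    if s == "bedroom" || s == "public room" then out ++ [s] else out) []
  let deduped : List String := (out.foldl (fun (st : PySem.Set String × List String) x =>
    if PySem.Set.contains st.1 x then st else (PySem.Set.add st.1 x, st.2 ++ [x]))
    (PySem.Set.empty, [])).2
  if deduped.isEmpty then none else some deduped

-- ===== PORT B =====
def coerce_enabled_roomtypes_py_alt (raw : List String) : Option (List String) :=
  if raw.isEmpty then none else
  let normed : List String := raw.foldl (fun acc x => acc ++ [pvNorm x]) []
  let b := PySem.List.index? normed "bedroom"      -- try: normed.index(...) except ValueError: None
  let p := PySem.List.index? normed "public room"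
  match b, p with
  | none, none => none
  | none, some _ => some ["public room"]
  | some _, none => some ["bedroom"]
  | some bi, some pi => if bi < pi then some ["bedroom", "public room"]
                        else some ["public room", "bedroom"]

-- ===== PRECONDITION & SPEC =====
def Spec_coerce_enabled_roomtypes_py (raw : List String) (out : Option (List String)) : Prop := out = coerce_enabled_roomtypes_py_alt raw
instance (raw : List String) (out : Option (List String)) : Decidable (Spec_coerce_enabled_roomtypes_py raw out) := by unfold Spec_coerce_enabled_roomtypes_py; infer_instance

-- ===== CLAIM (what is proved, stated in full; the proofs are below) =====
def Claim_equal_coerce_enabled_roomtypes_py : Prop := ∀ (raw : List String), Dom_coerce_enabled_roomtypes_py raw → Spec_coerce_enabled_roomtypes_py raw (coerce_enabled_roomtypes_py raw)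

-- ===== LEMMAS AND PROOFS =====

-- abbreviations for the proof
def pvKept (l : List String) : List String :=
  (l.filter (fun x => pvNorm x == "bedroom" || pvNorm x == "public room")).map pvNorm

def pvDedupStep (st : PySem.Set String × List String) (x : String) : PySem.Set String × List String :=
  if PySem.Set.contains st.1 x then st else (PySem.Set.add st.1 x, st.2 ++ [x])

-- A's first loop builds acc ++ pvKept l
theorem pv_outA (l : List String) (acc : List String) :
    l.foldl (fun out x =>
      let s := pvNorm x
      if s == "bedroom" || s == "public room" then out ++ [s] else out) acc
    = acc ++ pvKept l := by
  induction l generalizing acc with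
  | nil => simp [pvKept]
  | cons x xs ih =>
    simp only [List.foldl_cons, pvKept, List.filter_cons]
    by_cases h : (pvNorm x == "bedroom" || pvNorm x == "public room") = true
    · simp only [h, if_true, List.map_cons, ih]
      simp [pvKept]
    · simp only [h, Bool.false_eq_true, if_false, ih]
      simp [pvKept]

-- B's accumulation loop is map
theorem pv_normedB (l : List String) (acc : List String) :
    l.foldl (fun acc x => acc ++ [pvNorm x]) acc = acc ++ l.map pvNorm := by
  induction l generalizing acc with
  | nil => simp
  | cons x xs ih => simp [ih]

-- dedup fold over a list all of whose elements are already seen does nothing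
theorem pv_dedup_seen (w : List String) (st : PySem.Set String × List String)
    (h : ∀ y ∈ w, PySem.Set.contains st.1 y = true) :
    w.foldl pvDedupStep st = st := by
  induction w with
  | nil => rfl
  | cons y ys ih =>
    have hy := h y (List.mem_cons_self)
    simp only [List.foldl_cons, pvDedupStep, hy, if_true]
    exact ih (fun z hz => h z (List.mem_cons_of_mem _ hz))

-- dedup fold over a {a,b'}-valued list with a already seen and b' not seen:
-- appends b' once iff b' occurs
theorem pv_dedup_one (a b' : String) (hab : a ≠ b') (w : List String)
    (hw : ∀ y ∈ w, y = a ∨ y = b')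
    (seen : PySem.Set String) (acc : List String)
    (ha : PySem.Set.contains seen a = true)
    (hb : PySem.Set.contains seen b' = false) :
    (w.foldl pvDedupStep (seen, acc)).2 = acc ++ (if b' ∈ w then [b'] else []) := by
  induction w generalizing acc with
  | nil => simp
  | cons y ys ih =>
    rcases hw y List.mem_cons_self with rfl | rfl
    · simp only [List.foldl_cons, pvDedupStep, ha, if_true]
      rw [ih (fun z hz => hw z (List.mem_cons_of_mem _ hz)) acc]
      by_cases hm : b' ∈ ys
      · simp [hm, List.mem_cons]
      · have hne : b' ∉ y :: ys := by
          rw [List.mem_cons]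
          rintro (h | h)
          · exact hab h.symm
          · exact hm h
        simp [hm, hne]
    · simp only [List.foldl_cons, pvDedupStep, hb, Bool.false_eq_true, if_false]
      have hboth : ∀ z ∈ ys, PySem.Set.contains (PySem.Set.add seen y) z = true := by
        intro z hz
        rcases hw z (List.mem_cons_of_mem _ hz) with rfl | rfl
        · simp only [PySem.Set.add]
          split <;> simp_all [PySem.Set.contains]
        · have hz' : z ∉ seen := by simpa [PySem.Set.contains] using hb
          simp [PySem.Set.add, PySem.Set.contains, hz']
      rw [pv_dedup_seen ys _ hboth]
      simp [List.mem_cons]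

-- membership in pvKept equals existence of an element normalizing to the literal
theorem pv_mem_kept (l : List String) (v : String)
    (hv : (v == "bedroom" || v == "public room") = true) :
    v ∈ pvKept l ↔ v ∈ l.map pvNorm := by
  simp only [pvKept, List.mem_map, List.mem_filter]
  constructor
  · rintro ⟨x, ⟨hx, _⟩, rfl⟩; exact ⟨x, hx, rfl⟩
  · rintro ⟨x, hx, rfl⟩; exact ⟨x, ⟨hx, hv⟩, rfl⟩

-- every element of pvKept l is one of the two literals
theorem pv_kept_vals (l : List String) : ∀ y ∈ pvKept l, y = "bedroom" ∨ y = "public room" := by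
  intro y hy
  simp only [pvKept, List.mem_map, List.mem_filter] at hy
  rcases hy with ⟨x, ⟨-, hx⟩, rfl⟩
  rcases Bool.or_eq_true_iff.mp hx with h | h
  · exact Or.inl (by simpa using h)
  · exact Or.inr (by simpa using h)

-- the core characterization: the deduped list is determined by the two first indices
theorem pv_core (l : List String) :
    ((pvKept l).foldl pvDedupStep (PySem.Set.empty, [])).2
    = match PySem.List.index? (l.map pvNorm) "bedroom",
            PySem.List.index? (l.map pvNorm) "public room" with
      | none, none => ([] : List String)
      | none, some _ => ["public room"]
      | some _, none => ["bedroom"]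
      | some bi, some pi => if bi < pi then ["bedroom", "public room"]
                            else ["public room", "bedroom"] := by
  induction l with
  | nil => simp [pvKept, PySem.List.index?_eq_idxOf?]
  | cons x xs ih =>
    simp only [List.map_cons]
    by_cases hB : pvNorm x = "bedroom"
    · have hkept : pvKept (x :: xs) = "bedroom" :: pvKept xs := by
        simp [pvKept, hB]
      rw [hkept, List.foldl_cons]
      have hstep : pvDedupStep (PySem.Set.empty, []) "bedroom"
          = (PySem.Set.add PySem.Set.empty "bedroom", ["bedroom"]) := by
        simp [pvDedupStep, PySem.Set.empty, PySem.Set.contains]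
      rw [hstep,
        pv_dedup_one "bedroom" "public room" (by decide) _ (pv_kept_vals xs) _ _
          (by simp [PySem.Set.add, PySem.Set.empty, PySem.Set.contains])
          (by simp [PySem.Set.add, PySem.Set.empty, PySem.Set.contains]),
        hB, PySem.List.index?_cons_self,
        PySem.List.index?_cons_of_ne _ (by decide : ("bedroom" : String) ≠ "public room")]
      cases hp : PySem.List.index? (xs.map pvNorm) "public room" with
      | none =>
        have : "public room" ∉ pvKept xs := by
          rw [pv_mem_kept xs "public room" (by decide)]
          exact Iff.mp (PySem.List.index?_eq_none_iff _ _) hp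
        simp [this]
      | some k =>
        have : "public room" ∈ pvKept xs := by
          rw [pv_mem_kept xs "public room" (by decide)]
          exact Iff.mp (PySem.List.index?_isSome_iff _ _) (by rw [hp]; rfl)
        simp [this]
    · by_cases hP : pvNorm x = "public room"
      · have hkept : pvKept (x :: xs) = "public room" :: pvKept xs := by
          simp [pvKept, hP]
        rw [hkept, List.foldl_cons]
        have hstep : pvDedupStep (PySem.Set.empty, []) "public room"
            = (PySem.Set.add PySem.Set.empty "public room", ["public room"]) := by
          simp [pvDedupStep, PySem.Set.empty, PySem.Set.contains]
        rw [hstep,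
          pv_dedup_one "public room" "bedroom" (by decide) _
            (fun y hy => (pv_kept_vals xs y hy).symm) _ _
            (by simp [PySem.Set.add, PySem.Set.empty, PySem.Set.contains])
            (by simp [PySem.Set.add, PySem.Set.empty, PySem.Set.contains]),
          hP, PySem.List.index?_cons_self,
          PySem.List.index?_cons_of_ne _ (by decide : ("public room" : String) ≠ "bedroom")]
        cases hb : PySem.List.index? (xs.map pvNorm) "bedroom" with
        | none =>
          have : "bedroom" ∉ pvKept xs := by
            rw [pv_mem_kept xs "bedroom" (by decide)]
            exact Iff.mp (PySem.List.index?_eq_none_iff _ _) hb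
          simp [this]
        | some k =>
          have : "bedroom" ∈ pvKept xs := by
            rw [pv_mem_kept xs "bedroom" (by decide)]
            exact Iff.mp (PySem.List.index?_isSome_iff _ _) (by rw [hb]; rfl)
          simp [this]
      · have hkept : pvKept (x :: xs) = pvKept xs := by
          simp [pvKept, hB, hP]
        rw [hkept, ih,
          PySem.List.index?_cons_of_ne _ hB,
          PySem.List.index?_cons_of_ne _ hP]
        cases hb : PySem.List.index? (xs.map pvNorm) "bedroom" <;>
          cases hp : PySem.List.index? (xs.map pvNorm) "public room" <;>
          simp [Option.map_some] <;> omega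

-- ===== VERDICT (by name: the statement is the Claim_ definition above) =====
theorem coerce_enabled_roomtypes_py_spec : Claim_equal_coerce_enabled_roomtypes_py := by
  intro raw _
  unfold Spec_coerce_enabled_roomtypes_py coerce_enabled_roomtypes_py coerce_enabled_roomtypes_py_alt
  by_cases he : raw.isEmpty
  · simp [he]
  · simp only [he, if_false, Bool.false_eq_true]
    rw [pv_outA, pv_normedB, List.nil_append, List.nil_append]
    have := pv_core raw
    rw [show (fun (st : PySem.Set String × List String) x =>
      if PySem.Set.contains st.1 x then st else (PySem.Set.add st.1 x, st.2 ++ [x])) = pvDedupStep from rfl]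
    rw [this]
    cases hb : PySem.List.index? (raw.map pvNorm) "bedroom" <;>
      cases hp : PySem.List.index? (raw.map pvNorm) "public room" <;>
      simp <;> split <;> simp
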